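-- pv_equiv track=rewrite | github.com/jeniaws3095/finops | bot/core/execution_engine.py | _group_optimizations_by_region
-- ===== SOURCE A (Python) =====
-- from typing import Dict, List, Any, Optional, Callable, Union, Tuple
--
-- def _group_optimizations_by_region(
--                                  optimizations: List[Dict[str, Any]]) -> Dict[str, List[Dict[str, Any]]]:
--     """Group optimizations by AWS region."""
--     grouped = {}
--
--     for optimization in optimizations:
--         region = optimization.get('resourceData', {}).get('region', 'unknown')
--         if region not in grouped:
--             grouped[region] = []
--         grouped[region].append(optimization)
--
--     return grouped
-- ===== SOURCE B (Python) =====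
-- def _group_optimizations_by_region(optimizations):
--     def key(opt):
--         return opt.get('resourceData', {}).get('region', 'unknown')
--     regions = []
--     for opt in optimizations:
--         r = key(opt)
--         if r not in regions:
--             regions.append(r)
--     return {r: [opt for opt in optimizations if key(opt) == r] for r in regions}
-- ===== Notes on version B (the rewrite author's own statement) =====
-- stated objective: alternative
-- what changed: Replaced the incremental dict accumulation with a two-pass strategy: first collect the distinct regions in first-occurrence order, then build each group by filtering the input list per region.
import Mathlib
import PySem

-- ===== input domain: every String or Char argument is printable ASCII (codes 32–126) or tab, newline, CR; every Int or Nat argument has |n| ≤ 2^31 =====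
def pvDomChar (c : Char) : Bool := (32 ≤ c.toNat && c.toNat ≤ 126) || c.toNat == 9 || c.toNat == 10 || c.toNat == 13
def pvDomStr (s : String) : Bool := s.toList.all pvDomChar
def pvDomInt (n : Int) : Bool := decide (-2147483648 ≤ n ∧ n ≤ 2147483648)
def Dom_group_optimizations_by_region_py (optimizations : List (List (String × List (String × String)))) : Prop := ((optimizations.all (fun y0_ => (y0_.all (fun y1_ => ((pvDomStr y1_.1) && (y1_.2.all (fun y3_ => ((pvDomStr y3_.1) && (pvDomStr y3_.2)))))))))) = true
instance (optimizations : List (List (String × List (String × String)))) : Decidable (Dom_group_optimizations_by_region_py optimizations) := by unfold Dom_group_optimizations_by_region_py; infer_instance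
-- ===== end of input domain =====

-- B replaces A's single-pass dict accumulation by a two-pass scheme (distinct regions, then a filter per region); alternative decomposition, same results.

-- region = optimization.get('resourceData', {}).get('region', 'unknown')  (shared by both Pythons)
def pvRegionOf (opt : List (String × List (String × String))) : String :=
  PySem.Dict.getD (PySem.Dict.mk ((PySem.Dict.mk opt).getD "resourceData" [])) "region" "unknown"

-- ===== PORT A =====
-- grouped = {}; for opt: if region not in grouped: grouped[region] = []; grouped[region].append(opt)
def group_optimizations_by_region_py (optimizations : List (List (String × List (String × String)))) : List (String × List (List (String × List (String × String)))) :=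
  (optimizations.foldl
    (fun grouped opt =>
      let region := pvRegionOf opt
      let grouped := if grouped.contains region then grouped else grouped.insert region []
      grouped.modify region [] (· ++ [opt]))
    PySem.Dict.empty).items

-- ===== PORT B =====
-- regions = first-occurrence-ordered distinct keys; then {r: [opt for opt in optimizations if key(opt) == r] for r in regions}
def group_optimizations_by_region_py_alt (optimizations : List (List (String × List (String × String)))) : List (String × List (List (String × List (String × String)))) :=
  let regions := optimizations.foldl (fun rs opt => PySem.Set.add rs (pvRegionOf opt)) []
  regions.map (fun r => (r, optimizations.filter (fun opt => pvRegionOf opt == r)))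

-- ===== PRECONDITION & SPEC =====
def Spec_group_optimizations_by_region_py (optimizations : List (List (String × List (String × String)))) (out : List (String × List (List (String × List (String × String))))) : Prop := out = group_optimizations_by_region_py_alt optimizations
instance (optimizations : List (List (String × List (String × String)))) (out : List (String × List (List (String × List (String × String))))) : Decidable (Spec_group_optimizations_by_region_py optimizations out) := by
  unfold Spec_group_optimizations_by_region_py
  letI d1 : DecidableEq (List (String × List (String × String))) := inferInstance
  letI d2 : DecidableEq (List (List (String × List (String × String)))) := inferInstance
  letI d3 : DecidableEq (List (String × List (List (String × List (String × String))))) := inferInstance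
  exact d3 out _

-- ===== CLAIM (what is proved, stated in full; the proofs are below) =====
def Claim_equal_group_optimizations_by_region_py : Prop := ∀ (optimizations : List (List (String × List (String × String)))), Dom_group_optimizations_by_region_py optimizations → Spec_group_optimizations_by_region_py optimizations (group_optimizations_by_region_py optimizations)

-- ===== LEMMAS AND PROOFS =====

-- A's loop body is exactly "modify region [] (· ++ [opt])" (the contains-check only pre-creates the entry)
theorem pvStep_eq (grouped : PySem.Dict String (List (List (String × List (String × String))))) (opt : List (String × List (String × String))) :
    (let region := pvRegionOf opt
     let grouped := if grouped.contains region then grouped else grouped.insert region []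
     grouped.modify region [] (· ++ [opt]))
    = grouped.modify (pvRegionOf opt) [] (· ++ [opt]) := by
  by_cases h : grouped.contains (pvRegionOf opt)
  · simp [h]
  · have hc : grouped.contains (pvRegionOf opt) = false := by simpa using h
    simp [h, PySem.Dict.modify, PySem.Dict.getD_insert_self, PySem.Dict.insert_insert_self,
      PySem.Dict.getD_of_not_contains grouped [] hc]

-- ===== VERDICT =====
theorem group_optimizations_by_region_py_spec : Claim_equal_group_optimizations_by_region_py := by
  intro optimizations _
  unfold Spec_group_optimizations_by_region_py group_optimizations_by_region_py group_optimizations_by_region_py_alt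
  have hstep : (optimizations.foldl
      (fun grouped opt =>
        let region := pvRegionOf opt
        let grouped := if grouped.contains region then grouped else grouped.insert region []
        grouped.modify region [] (· ++ [opt]))
      PySem.Dict.empty)
      = optimizations.foldl (fun d opt => d.modify (pvRegionOf opt) [] (· ++ [opt])) PySem.Dict.empty := by
    congr 1
    funext grouped opt
    exact pvStep_eq grouped opt
  rw [hstep]
  set D := optimizations.foldl (fun d opt => d.modify (pvRegionOf opt) [] (· ++ [opt])) PySem.Dict.empty with hD
  have hnd : D.keys.Nodup := by
    rw [hD]
    exact PySem.Dict.nodup_keys_foldl_modify_key optimizations pvRegionOf [] (fun _ o v => v ++ [o]) _ PySem.Dict.nodup_keys_empty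
  have hkeys : D.keys = optimizations.foldl (fun rs opt => PySem.Set.add rs (pvRegionOf opt)) [] := by
    rw [hD, PySem.Dict.keys_foldl_modify_key optimizations pvRegionOf [] (fun _ o v => v ++ [o]), ← PySem.Set.update_map_eq_foldl_add]
    simp [PySem.Dict.keys_empty]
  have hget : ∀ k, D.getD k [] = optimizations.filter (fun opt => pvRegionOf opt == k) := by
    intro k
    have hmap : D = (optimizations.map (fun o => (pvRegionOf o, o))).foldl
        (fun d p => d.modify p.1 [] (· ++ [p.2])) PySem.Dict.empty := by
      rw [hD, List.foldl_map]
    rw [hmap, PySem.Dict.getD_foldl_modify_append]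
    simp [PySem.Dict.getD_empty, List.filter_map, Function.comp_def]
  calc D.items = D.keys.map (fun k => (k, D.getD k [])) := PySem.Dict.items_eq_map_keys D hnd []
    _ = _ := by rw [hkeys]; exact List.map_congr_left (fun k _ => by rw [hget k])
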